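-- pv_equiv track=rewrite | github.com/jacksonbmitchusson/SecurityProject | detection.py | hamming_dist
-- ===== SOURCE A (Python) =====
-- def varpadding(s, n, i, pad_char):
--     return i*pad_char + s + (n - i)*pad_char
--
-- def hamming_dist(s1, s2):
--     diff = len(s1) - len(s2)
--     if(diff == 0):
--         count = 0
--         for i in range(len(s1)):
--             count += 1 if s1[i] != s2[i] else 0
--         return count
--
--     min_dist = len(s1) + len(s2)
--     for i in range(abs(diff) + 1):
--         if(diff < 0): #s1 < s2
--             new_s1 = varpadding(s1, abs(diff), i, ' ')
--             min_dist = min(min_dist, hamming_dist(new_s1, s2))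
--         else:
--             new_s2 = varpadding(s2, abs(diff), i, ' ')
--             min_dist = min(min_dist, hamming_dist(s1, new_s2))
--     return min_dist
-- ===== SOURCE B (Python) =====
-- def hamming_dist(s1, s2):
--     a, b = (s1, s2) if len(s1) >= len(s2) else (s2, s1)
--     n, m = len(a), len(b)
--     def cost(i):
--         return (sum(x != y for x, y in zip(a[i:i+m], b))
--                 + sum(c != ' ' for c in a[:i])
--                 + sum(c != ' ' for c in a[i+m:]))
--     return min(cost(i) for i in range(n - m + 1))
-- ===== Notes on version B (the rewrite author's own statement) =====
-- stated objective: alternative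
-- what changed: B replaces A's recursive build-a-padded-string-and-recompare minimisation by a single non-recursive sliding-window scan that, for each offset, sums window mismatches plus the non-space characters of the longer string outside the window, never constructing a padded string and never recursing.
import Mathlib
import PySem

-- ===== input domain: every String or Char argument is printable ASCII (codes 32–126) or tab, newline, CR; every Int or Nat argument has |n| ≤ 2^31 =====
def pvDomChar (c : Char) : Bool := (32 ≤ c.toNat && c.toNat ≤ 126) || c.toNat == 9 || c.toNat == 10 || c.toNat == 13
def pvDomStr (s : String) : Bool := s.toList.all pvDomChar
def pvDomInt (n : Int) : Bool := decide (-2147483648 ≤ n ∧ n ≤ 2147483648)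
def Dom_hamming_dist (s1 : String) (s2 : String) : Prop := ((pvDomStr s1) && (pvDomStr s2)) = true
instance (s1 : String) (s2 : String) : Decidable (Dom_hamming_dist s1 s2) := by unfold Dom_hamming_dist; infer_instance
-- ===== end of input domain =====

-- B replaces A's recursive pad-and-recompare minimisation by a single non-recursive sliding-window
-- scan that never builds a padded string (objective: alternative formulation, same exact values).

-- ===== PORT A =====
def pvVarpadding (s : List Char) (n : Nat) (i : Nat) (pad : Char) : List Char :=
  List.replicate i pad ++ s ++ List.replicate (n - i) pad

-- "for i in range(len(s1)): count += 1 if s1[i] != s2[i] else 0" — A only reaches it with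
-- len(s1) == len(s2), so both indexings are in range and pyGetD's default is never used.
def pvCountLoop (l1 l2 : List Char) : Int :=
  (PySem.List.pyRange 0 (l1.length : Int) 1).foldl
    (fun count i => count + (if PySem.List.pyGetD l1 i ' ' ≠ PySem.List.pyGetD l2 i ' ' then 1 else 0)) 0

-- body of Python's hamming_dist on char lists; the fuel argument only guards totality:
-- every recursive call A makes has diff == 0 and recurses no further, so depth 2 is never exhausted
def pvHamFuel : Nat → List Char → List Char → Int
  | 0, _, _ => 0
  | fuel + 1, l1, l2 =>
    let diff : Int := (l1.length : Int) - (l2.length : Int)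
    if diff = 0 then pvCountLoop l1 l2
    else
      (PySem.List.pyRange 0 ((diff.natAbs : Int) + 1) 1).foldl
        (fun md i =>
          if diff < 0 then min md (pvHamFuel fuel (pvVarpadding l1 diff.natAbs i.toNat ' ') l2)
          else min md (pvHamFuel fuel l1 (pvVarpadding l2 diff.natAbs i.toNat ' ')))
        ((l1.length : Int) + (l2.length : Int))

def hamming_dist (s1 : String) (s2 : String) : Int := pvHamFuel 2 s1.toList s2.toList

-- ===== PORT B =====
-- sum(x != y for x, y in zip(u, v))
def pvMismZip (x y : List Char) : Int :=
  ((x.zip y).map (fun p => if p.1 ≠ p.2 then (1 : Int) else 0)).sum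

-- sum(c != ' ' for c in l)
def pvNonspace (l : List Char) : Int :=
  (l.map (fun c => if c ≠ ' ' then (1 : Int) else 0)).sum

-- cost(i) of Source B: window mismatches plus non-space chars of a outside the window
def pvCost (a b : List Char) (i : Int) : Int :=
  pvMismZip (PySem.List.slice a (some i) (some (i + (b.length : Int)))) b
  + pvNonspace (PySem.List.slice a none (some i))
  + pvNonspace (PySem.List.slice a (some (i + (b.length : Int))) none)

-- min(...) of the nonempty generator; getD 0 is unreachable since n - m + 1 ≥ 1
def hamming_dist_alt (s1 : String) (s2 : String) : Int :=
  let ab := if s1.toList.length ≥ s2.toList.length then (s1.toList, s2.toList) else (s2.toList, s1.toList)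
  (PySem.List.min?
    ((PySem.List.pyRange 0 ((ab.1.length : Int) - (ab.2.length : Int) + 1) 1).map (pvCost ab.1 ab.2))
    (fun x => x)).getD 0

-- ===== PRECONDITION & SPEC =====
def Spec_hamming_dist (s1 : String) (s2 : String) (out : Int) : Prop := out = hamming_dist_alt s1 s2
instance (s1 : String) (s2 : String) (out : Int) : Decidable (Spec_hamming_dist s1 s2 out) := by unfold Spec_hamming_dist; infer_instance

-- ===== CLAIM (what is proved, stated in full; the proofs are below) =====
def Claim_equal_hamming_dist : Prop := ∀ (s1 : String) (s2 : String), Dom_hamming_dist s1 s2 → Spec_hamming_dist s1 s2 (hamming_dist s1 s2)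

-- ===== LEMMAS AND PROOFS =====

theorem pvMismZip_comm (x y : List Char) : pvMismZip x y = pvMismZip y x := by
  induction x generalizing y with
  | nil => cases y <;> simp [pvMismZip]
  | cons c t ih =>
    cases y with
    | nil => simp [pvMismZip]
    | cons d u =>
      simp only [pvMismZip, List.zip_cons_cons, List.map_cons, List.sum_cons] at *
      rw [ih u]
      congr 1
      simp [ne_comm]

theorem pvMismZip_le (x y : List Char) : pvMismZip x y ≤ (y.length : Int) := by
  induction x generalizing y with
  | nil =>
    have h0 : pvMismZip [] y = 0 := by simp [pvMismZip]
    rw [h0]; positivity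
  | cons c t ih =>
    cases y with
    | nil => simp [pvMismZip]
    | cons d u =>
      simp only [pvMismZip, List.zip_cons_cons, List.map_cons, List.sum_cons, List.length_cons] at *
      have := ih u
      split_ifs <;> push_cast <;> omega

theorem pvNonspace_le (l : List Char) : pvNonspace l ≤ (l.length : Int) := by
  induction l with
  | nil => simp [pvNonspace]
  | cons c t ih =>
    simp only [pvNonspace, List.map_cons, List.sum_cons, List.length_cons] at *
    split_ifs <;> push_cast <;> omega

theorem pvSumRangeGetD (x y : List Char) (h : x.length = y.length) :
    ((List.range x.length).map (fun k => if x.getD k ' ' ≠ y.getD k ' ' then (1 : Int) else 0)).sum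
      = pvMismZip x y := by
  induction x generalizing y with
  | nil => simp [pvMismZip]
  | cons c t ih =>
    cases y with
    | nil => simp at h
    | cons d u =>
      have ht : t.length = u.length := by simpa using h
      simp only [List.length_cons, List.range_succ_eq_map, List.map_cons, List.map_map,
        List.sum_cons, List.getD_cons_zero, Function.comp_def, Nat.succ_eq_add_one,
        List.getD_cons_succ, pvMismZip, List.zip_cons_cons]
      rw [show ((List.range t.length).map (fun k => if t.getD k ' ' ≠ u.getD k ' ' then (1:Int) else 0)).sum
            = pvMismZip t u from ih u ht]
      rfl

theorem pvCountLoop_eq (l1 l2 : List Char) (h : l1.length = l2.length) :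
    pvCountLoop l1 l2 = pvMismZip l1 l2 := by
  unfold pvCountLoop
  rw [PySem.List.foldl_add _ (fun i => if PySem.List.pyGetD l1 i ' ' ≠ PySem.List.pyGetD l2 i ' ' then (1:Int) else 0)]
  rw [PySem.List.pyRange_one]
  simp only [List.map_map, Function.comp_def, zero_add, Int.sub_zero, Int.toNat_natCast,
    PySem.List.pyGetD_natCast]
  rw [pvSumRangeGetD l1 l2 h]

theorem pvMismZip_append (u v a : List Char) (h : u.length ≤ a.length) :
    pvMismZip (u ++ v) a = pvMismZip u (a.take u.length) + pvMismZip v (a.drop u.length) := by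
  conv_lhs => rw [show a = a.take u.length ++ a.drop u.length by simp]
  unfold pvMismZip
  rw [List.zip_append (by simp [h]), List.map_append, List.sum_append]

theorem pvMismZip_replicate (k : Nat) (s : List Char) (h : s.length = k) :
    pvMismZip (List.replicate k ' ') s = pvNonspace s := by
  induction k generalizing s with
  | zero => cases s <;> simp_all [pvMismZip, pvNonspace]
  | succ n ih =>
    cases s with
    | nil => simp at h
    | cons c t =>
      have ht : t.length = n := by simpa using h
      have iht := ih t ht
      simp only [pvMismZip, pvNonspace] at iht ⊢
      simp only [List.replicate_succ, List.zip_cons_cons, List.map_cons, List.sum_cons]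
      rw [iht]
      congr 1
      simp [ne_comm]

theorem pvHamFuel_eq_mism (f : Nat) (x y : List Char) (h : x.length = y.length) :
    pvHamFuel (f + 1) x y = pvMismZip x y := by
  have hd : (x.length : Int) - (y.length : Int) = 0 := by omega
  simp only [pvHamFuel, hd, if_true]
  exact pvCountLoop_eq x y h

theorem pvPad_mism (a b : List Char) (d i : Nat) (hd : a.length = b.length + d) (hi : i ≤ d) :
    pvMismZip (pvVarpadding b d i ' ') a = pvCost a b (i : Int) := by
  unfold pvVarpadding
  rw [show List.replicate i ' ' ++ b ++ List.replicate (d - i) ' '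
        = List.replicate i ' ' ++ (b ++ List.replicate (d - i) ' ') by simp [List.append_assoc]]
  rw [pvMismZip_append _ _ _ (by simp; omega)]
  simp only [List.length_replicate]
  rw [pvMismZip_append b _ _ (by simp; omega)]
  rw [pvMismZip_replicate i (a.take i) (by simp; omega)]
  rw [pvMismZip_replicate (d - i) ((a.drop i).drop b.length) (by simp; omega)]
  unfold pvCost
  rw [PySem.List.slice_natCast_add a i b.length]
  rw [PySem.List.slice_to_natCast]
  rw [show (i : Int) + (b.length : Int) = ((i + b.length : Nat) : Int) by push_cast; ring]
  rw [PySem.List.slice_from_natCast]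
  rw [show a.drop (i + b.length) = (a.drop i).drop b.length by rw [List.drop_drop, Nat.add_comm]]
  rw [pvMismZip_comm _ b]
  ring

theorem pvCost_zero_le (a b : List Char) :
    pvCost a b 0 ≤ (a.length : Int) + (b.length : Int) := by
  unfold pvCost
  rw [PySem.List.slice_zero_start, show ((0 : Int) + (b.length : Int)) = ((b.length : Nat) : Int) by ring]
  rw [PySem.List.slice_to_natCast, PySem.List.slice_from_natCast]
  rw [show PySem.List.slice a none (some (0 : Int)) = a.take 0 from PySem.List.slice_to_natCast a 0]
  have h1 := pvMismZip_le (a.take b.length) b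
  have h2 := pvNonspace_le (a.take 0)
  have h3 := pvNonspace_le (a.drop b.length)
  simp only [List.length_take, List.length_drop] at h2 h3
  have : ((a.length - b.length : Nat) : Int) ≤ (a.length : Int) := by omega
  simp only [List.take_zero] at h2 ⊢
  omega

theorem pvCost_zero_eq (x y : List Char) (h : x.length = y.length) :
    pvCost x y 0 = pvMismZip x y := by
  unfold pvCost
  rw [PySem.List.slice_zero_start, show ((0 : Int) + (y.length : Int)) = ((y.length : Nat) : Int) by ring]
  rw [PySem.List.slice_to_natCast, PySem.List.slice_from_natCast]
  rw [show PySem.List.slice x none (some (0 : Int)) = x.take 0 from PySem.List.slice_to_natCast x 0]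
  rw [List.take_of_length_le (by omega), List.drop_of_length_le (by omega)]
  simp [pvNonspace]

theorem pvMain (a b : List Char) (hle : b.length ≤ a.length) :
    (PySem.List.pyRange 0 ((a.length : Int) - (b.length : Int) + 1) 1).foldl
      (fun md i => min md (pvCost a b i)) ((a.length : Int) + (b.length : Int))
    = (PySem.List.min?
        ((PySem.List.pyRange 0 ((a.length : Int) - (b.length : Int) + 1) 1).map (pvCost a b))
        (fun x => x)).getD 0 := by
  rw [← List.foldl_map]
  rw [PySem.List.pyRange_one_cons (by omega : (0 : Int) < (a.length : Int) - (b.length : Int) + 1)]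
  rw [List.map_cons, List.foldl_cons, PySem.List.min?_id_cons]
  simp only [Option.getD_some]
  rw [min_eq_right (pvCost_zero_le a b)]

theorem pvGoEqAlt (l1 l2 : List Char) :
    pvHamFuel 2 l1 l2 =
      (let ab := if l1.length ≥ l2.length then (l1, l2) else (l2, l1)
       (PySem.List.min?
         ((PySem.List.pyRange 0 ((ab.1.length : Int) - (ab.2.length : Int) + 1) 1).map (pvCost ab.1 ab.2))
         (fun x => x)).getD 0) := by
  rcases Nat.lt_trichotomy l1.length l2.length with hlt | heq | hgt
  · have hge : ¬ (l1.length ≥ l2.length) := by omega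
    simp only [if_neg hge]
    show pvHamFuel (1 + 1) l1 l2 = _
    have hd0 : ¬ ((l1.length : Int) - (l2.length : Int) = 0) := by omega
    simp only [pvHamFuel]
    rw [if_neg hd0]
    rw [PySem.List.foldl_congr_mem _ _ (fun md i => min md (pvCost l2 l1 i)) _ (fun md i hi => by
      have hib := (PySem.List.mem_pyRange_one.mp hi)
      have hlen : (pvVarpadding l1 ((l1.length : Int) - (l2.length : Int)).natAbs i.toNat ' ').length
          = l2.length := by
        simp only [pvVarpadding, List.length_append, List.length_replicate]; omega
      rw [if_pos (by omega : (l1.length : Int) - (l2.length : Int) < 0)]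
      rw [if_pos (by rw [hlen]; omega :
        ((pvVarpadding l1 ((l1.length : Int) - (l2.length : Int)).natAbs i.toNat ' ').length : Int)
          - (l2.length : Int) = 0)]
      rw [pvCountLoop_eq _ _ hlen]
      rw [pvPad_mism l2 l1 ((l1.length : Int) - (l2.length : Int)).natAbs i.toNat (by omega)
        (by omega)]
      rw [Int.toNat_of_nonneg hib.1])]
    rw [show ((((l1.length : Int) - (l2.length : Int)).natAbs : Int) + 1)
          = (l2.length : Int) - (l1.length : Int) + 1 by omega]
    rw [show ((l1.length : Int) + (l2.length : Int)) = ((l2.length : Int) + (l1.length : Int)) by ring]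
    exact pvMain l2 l1 (by omega)
  · have hge : l1.length ≥ l2.length := by omega
    simp only [if_pos hge]
    rw [pvHamFuel_eq_mism 1 l1 l2 heq]
    rw [PySem.List.pyRange_one]
    simp only [Int.sub_zero]
    rw [show ((l1.length : Int) - (l2.length : Int) + 1).toNat = 1 by omega]
    simp only [List.range_one, List.map_cons, List.map_nil, zero_add, Nat.cast_zero]
    rw [PySem.List.min?_id_cons]
    simp only [List.foldl_nil, Option.getD_some]
    exact (pvCost_zero_eq l1 l2 heq).symm
  · have hge : l1.length ≥ l2.length := by omega
    simp only [if_pos hge]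
    show pvHamFuel (1 + 1) l1 l2 = _
    have hd0 : ¬ ((l1.length : Int) - (l2.length : Int) = 0) := by omega
    simp only [pvHamFuel]
    rw [if_neg hd0]
    rw [PySem.List.foldl_congr_mem _ _ (fun md i => min md (pvCost l1 l2 i)) _ (fun md i hi => by
      have hib := (PySem.List.mem_pyRange_one.mp hi)
      have hlen : l1.length
          = (pvVarpadding l2 ((l1.length : Int) - (l2.length : Int)).natAbs i.toNat ' ').length := by
        simp only [pvVarpadding, List.length_append, List.length_replicate]; omega
      rw [if_neg (by omega : ¬ ((l1.length : Int) - (l2.length : Int) < 0))]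
      rw [if_pos (by rw [← hlen]; omega :
        (l1.length : Int)
          - ((pvVarpadding l2 ((l1.length : Int) - (l2.length : Int)).natAbs i.toNat ' ').length : Int) = 0)]
      rw [pvCountLoop_eq _ _ hlen]
      rw [pvMismZip_comm]
      rw [pvPad_mism l1 l2 ((l1.length : Int) - (l2.length : Int)).natAbs i.toNat (by omega)
        (by omega)]
      rw [Int.toNat_of_nonneg hib.1])]
    rw [show ((((l1.length : Int) - (l2.length : Int)).natAbs : Int) + 1)
          = (l1.length : Int) - (l2.length : Int) + 1 by omega]
    exact pvMain l1 l2 (by omega)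

-- ===== VERDICT (by name: the statement is the Claim_ definition above) =====
theorem hamming_dist_spec : Claim_equal_hamming_dist := by
  unfold Claim_equal_hamming_dist Spec_hamming_dist hamming_dist hamming_dist_alt
  intro s1 s2 _
  exact pvGoEqAlt s1.toList s2.toList
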